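-- pv_equiv track=rewrite | github.com/PepperLola/adventofcode | 2016/day9/main.py | format_time
-- ===== SOURCE A (Python) =====
-- def format_time(time_ns):
--     names = ["hr", "m", "s", "ms", "µs", "ns"]
--     names.reverse()
--     times = [
--         time_ns % 1000,
--         (time_ns // 1000) % 1000,
--         (time_ns // (1000 * 10**3)) % 1000,
--         (time_ns // (1000 * 10**6)) % 60,
--         (time_ns // (1000 * 10**6) // 60) % 60,
--         (time_ns // (1000 * 10**6) // 60 // 60) % 60
--     ]
--     for i in range(0, len(times)):
--         if i < len(times) - 1:
--             if times[i + 1] == 0: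
--                 return "%s%s " % (times[i], names[i])
--         else:
--             return "%s%s " % (times[i], names[i])
-- ===== SOURCE B (Python) =====
-- def format_time(time_ns):
--     def go(q, units):
--         name, m = units[0]
--         rest = units[1:]
--         cur = q % m
--         if not rest:
--             return "%s%s " % (cur, name)
--         nq = q // m
--         if nq % rest[0][1] == 0:
--             return "%s%s " % (cur, name)
--         return go(nq, rest)
--     return go(time_ns, [("ns", 1000), ("µs", 1000), ("ms", 1000),
--                         ("s", 60), ("m", 60), ("hr", 60)])
-- ===== Notes on version B (the rewrite author's own statement) =====
-- stated objective: alternative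
-- what changed: A precomputes all six unit values with absolute divisors (t//10**6, t//10**9, ...) into a list and scans it by index with three return sites; B is a recursive peel over a (name, modulus) unit list that maintains only a running quotient, repeatedly dividing it by the current modulus and returning when the peeled next quotient's residue vanishes - no value list, no index arithmetic, no absolute divisors.
import Mathlib
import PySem

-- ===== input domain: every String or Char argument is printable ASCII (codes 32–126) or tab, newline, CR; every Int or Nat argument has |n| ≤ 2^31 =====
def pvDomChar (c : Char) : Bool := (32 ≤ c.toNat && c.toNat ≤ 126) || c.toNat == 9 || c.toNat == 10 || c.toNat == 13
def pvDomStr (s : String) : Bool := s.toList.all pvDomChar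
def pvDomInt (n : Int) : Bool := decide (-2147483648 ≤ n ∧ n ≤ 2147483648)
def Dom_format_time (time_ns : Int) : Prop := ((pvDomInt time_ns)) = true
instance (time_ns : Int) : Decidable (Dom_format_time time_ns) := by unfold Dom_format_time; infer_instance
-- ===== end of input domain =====

-- B replaces A's build-all-six-values-then-index-scan by a recursive peel over a
-- (name, modulus) list that only maintains a running quotient (objective: alternative).

-- ===== PORT A =====
-- the for-loop over range(0, len(times)) with its early returns; none = the unreachable
-- fall-through (Python would return None) or an IndexError, neither of which occurs here
def formatLoopA (times : List Int) (names : List String) : List Int → Option String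
  | [] => none
  | i :: rest =>
    if i < (times.length : Int) - 1 then
      match PySem.List.pyGet? times (i + 1) with
      | none => none
      | some v =>
        if v == 0 then
          match PySem.List.pyGet? times i, PySem.List.pyGet? names i with
          | some ti, some ni => some (PySem.Int.toStr ti ++ ni ++ " ")
          | _, _ => none
        else formatLoopA times names rest
    else
      match PySem.List.pyGet? times i, PySem.List.pyGet? names i with
      | some ti, some ni => some (PySem.Int.toStr ti ++ ni ++ " ")
      | _, _ => none

def format_time (time_ns : Int) : String :=
  let names := (["hr", "m", "s", "ms", "µs", "ns"]).reverse
  let times : List Int := [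
    PySem.Int.mod time_ns 1000,
    PySem.Int.mod (PySem.Int.floordiv time_ns 1000) 1000,
    PySem.Int.mod (PySem.Int.floordiv time_ns (1000 * 10^3)) 1000,
    PySem.Int.mod (PySem.Int.floordiv time_ns (1000 * 10^6)) 60,
    PySem.Int.mod (PySem.Int.floordiv (PySem.Int.floordiv time_ns (1000 * 10^6)) 60) 60,
    PySem.Int.mod (PySem.Int.floordiv (PySem.Int.floordiv (PySem.Int.floordiv time_ns (1000 * 10^6)) 60) 60) 60]
  (formatLoopA times names (PySem.List.pyRange 0 (times.length : Int) 1)).getD ""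

-- ===== PORT B =====
-- recursive peel: carry the running quotient q; at each unit take cur = q % m,
-- return at the last unit or when the next residue of the peeled quotient is 0.
-- "" is the unreachable empty-units case (go is only ever called on nonempty lists).
def formatPeel (q : Int) : List (String × Int) → String
  | [] => ""
  | (name, m) :: rest =>
    let cur := PySem.Int.mod q m
    match rest with
    | [] => PySem.Int.toStr cur ++ name ++ " "
    | (_, m') :: _ =>
      let nq := PySem.Int.floordiv q m
      if PySem.Int.mod nq m' == 0 then PySem.Int.toStr cur ++ name ++ " "
      else formatPeel nq rest

def format_time_alt (time_ns : Int) : String :=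
  formatPeel time_ns [("ns", 1000), ("µs", 1000), ("ms", 1000), ("s", 60), ("m", 60), ("hr", 60)]

-- ===== PRECONDITION & SPEC =====
def Spec_format_time (time_ns : Int) (out : String) : Prop := out = format_time_alt time_ns
instance (time_ns : Int) (out : String) : Decidable (Spec_format_time time_ns out) := by unfold Spec_format_time; infer_instance

-- ===== CLAIM =====
def Claim_equal_format_time : Prop := ∀ (time_ns : Int), Dom_format_time time_ns → Spec_format_time time_ns (format_time time_ns)

-- ===== LEMMAS AND PROOFS =====

theorem ediv_ediv_1000 (a : Int) : a / 1000 / 1000 = a / 1000000 := by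
  rw [Int.ediv_ediv_of_nonneg (by norm_num)]; norm_num

theorem ediv_ediv_10_9 (a : Int) : a / 1000000 / 1000 = a / 1000000000 := by
  rw [Int.ediv_ediv_of_nonneg (by norm_num)]; norm_num

theorem format_time_eq (time_ns : Int) : format_time time_ns = format_time_alt time_ns := by
  norm_num [format_time, format_time_alt,
    show PySem.List.pyRange 0 6 1 = [0, 1, 2, 3, 4, 5] from by decide,
    formatLoopA, formatPeel, PySem.List.pyGet?, PySem.List.pyIdx?,
    show Int.toNat 2 = 2 from rfl, show Int.toNat 3 = 3 from rfl,
    show Int.toNat 4 = 4 from rfl, show Int.toNat 5 = 5 from rfl,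
    ediv_ediv_1000, ediv_ediv_10_9]
  split_ifs <;> rfl

-- ===== VERDICT =====
theorem format_time_spec : Claim_equal_format_time := by
  intro t _
  exact format_time_eq t
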